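/- GENERATED by mk_final_copies.py from the proof of the farm's unit `codebook_decode_deinterleave_repeat.2b` (farm:codebook_decode_deinterleave_repeat.2b.1: Lemmas.lean) as the
   re-elaboration sweep compiled it — do not edit. -/
import Asan.CheckWalk
import Vorbis.Spec.ReaderLemmas
import Vorbis.Spec.PacketRest3
import Vorbis.Spec.Units.codebook_decode_deinterleave_repeat_2b

/-
  THE LEMMAS OF UNIT codebook_decode_deinterleave_repeat.2b (the inline DECODE_RAW proper of loop 1901, 10DE32H → 10DECFH ∨ 10DC5CH).
  `book_carry`, `stack_stores`, `fast_stores`: what the stores of the segment keep (`Seg2Wins`, `Bits f`, the spill slot of `f`,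
  `CodebookOK c`); `result_sign`, `vb_sub_ok`, `vb_sub_V1`, `vb_toInt`: the bit-level facts of the farm's proof of
  vorbis_decode_packet_rest.3b (the same code shape), which has no copy in the tree.
-/
set_option maxRecDepth 4000
set_option maxHeartbeats 4000000

namespace Vorbis.Spec.codebook_decode_deinterleave_repeat_2b
open X86 X86.User Asan Vorbis Vorbis.Spec Vorbis.Spec.Deint

/-- **What the call of codebook_decode_scalar_raw needs of the book, after stores inside `Seg2Wins`** (the state at the call has
the stack pointer of the pushed return address, so `Common.carry_seg2` does not apply to it): the struct at `c` and the
`sorted_values` block are off every window (`CarryWin.book`, `.sv`), so `CodebookOK c`, `BookApart f c` hold in the new memory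
and the fields of the struct read the same. The lines of `Common.carry_wins` that prove its `cb`, `apart`, `book`. -/
theorem book_carry {others : List Obj} {frames : List (Nat × FrameLayout)} {Blk : Block → Prop} {len : Nat} {u₀ : State}
    {ret : Word} {e v : State} {m' : Mem} (h : Common others frames Blk len u₀ ret e v) (g : DeintGeo e)
    (hs : Mem.SameExcept (Seg2Wins (e.reg .rsp).toNat (fOf e)) v.mem m') :
    CodebookOK Blk m' (cOf e) ∧ BookApart m' (fOf e) (cOf e) ∧ Codebook.SameFields v.mem m' (cOf e) := by
  have hW : ∀ w, w ∈ Seg2Wins (e.reg .rsp).toNat (fOf e) → CarryWin others frames Blk len e w := seg2Wins_carryWin g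
  obtain ⟨B, hB, hin⟩ := h.pre.book.book
  have hok := h.pre.book.ok
  have hd1 : ∀ w, w ∈ Seg2Wins (e.reg .rsp).toNat (fOf e) →
      (Codebook.block (cOf e)).base + (Codebook.block (cOf e)).size ≤ w.lo ∨ w.hi ≤ (Codebook.block (cOf e)).base := by
    intro w hw
    have := (hW w hw).book
    simp only [Off.sizeof.Codebook]
    exact this
  have hkept : (Codebook.block (cOf e)).Kept v.mem m' :=
    Block.Kept.of_sameExcept hs hd1 (Codebook.block_no_wrap hok hB hin)
  have hsf : Codebook.SameFields v.mem m' (cOf e) := Codebook.SameFields.of_kept hkept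
  have esv : Codebook.svBlock v.mem (cOf e) = Codebook.svBlock e.mem (cOf e) := by
    unfold Codebook.svBlock
    rw [h.book.sorted_values, h.book.sorted_entries]
  have hd2 : 1 ≤ Codebook.sorted_entries v.mem (cOf e) → ∀ w, w ∈ Seg2Wins (e.reg .rsp).toNat (fOf e) →
      (Codebook.svBlock v.mem (cOf e)).base + (Codebook.svBlock v.mem (cOf e)).size ≤ w.lo ∨
        w.hi ≤ (Codebook.svBlock v.mem (cOf e)).base := by
    intro hse w hw
    rw [esv]
    rw [h.book.sorted_entries] at hse
    exact (hW w hw).sv hse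
  exact ⟨h.cb.frame_sameExcept hok hB hin hs hd1 hd2, h.apart.frame hsf, hsf⟩

/-- **The three stack stores every path of the segment makes first** (the return address of the load4 check at `[rsp−8]`, the
re-store of `f` into its spill slot `[rsp+18H]` 10DE43H, the return address of a later check or call at `[rsp−8]` again): they
stay inside `Seg2Wins`, they are off `*f` (`Bits f`, μ kept), and the spill slot holds `f` again. -/
theorem stack_stores {others : List Obj} {frames : List (Nat × FrameLayout)} {Blk : Block → Prop} {len : Nat} {u₀ : State}
    {ret : Word} {e u : State} (h : Common others frames Blk len u₀ ret e u) (g : DeintGeo e) (r1 r2 : Nat) (m' : Mem)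
    (hm : m' = ((u.mem.writeLE (e.reg .rsp - 112) 8 r1).writeLE (e.reg .rsp - 80) 8 (e.reg .rdi).toNat).writeLE
      (e.reg .rsp - 112) 8 r2) :
    Mem.SameExcept (Seg2Wins (e.reg .rsp).toNat (fOf e)) u.mem m' ∧ ReaderPost Blk len e.mem m' (fOf e) ∧
      UInt64.ofNat (m'.readLE (e.reg .rsp - 80) 8) = e.reg .rdi := by
  have hlo := g.sp_lo
  have hhi := g.sp_hi
  have gf1 := g.f_st
  have gf2 := g.f_lo
  have gf3 := g.f_hi
  simp only [fOf] at gf1 gf2 gf3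
  subst hm
  have hs0 : Mem.SameExcept [⟨(e.reg .rsp).toNat - 112, (e.reg .rsp).toNat - 104⟩,
      ⟨(e.reg .rsp).toNat - 80, (e.reg .rsp).toNat - 72⟩] u.mem
      (((u.mem.writeLE (e.reg .rsp - 112) 8 r1).writeLE (e.reg .rsp - 80) 8 (e.reg .rdi).toNat).writeLE
        (e.reg .rsp - 112) 8 r2) := by
    u_same
  refine ⟨?_, ?_, ?_⟩
  · apply (Mem.SameExcept.refl _ _).step_same hs0
    intro w hw a h1 h2
    simp only [List.mem_cons, List.not_mem_nil, or_false] at hw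
    unfold Seg2Wins
    simp only [List.mem_cons, exists_eq_or_imp]
    rcases hw with rfl | rfl <;> simp only at h1 h2 <;> omega
  · apply Common.reader_off h g hs0
    intro w hw
    simp only [List.mem_cons, List.not_mem_nil, or_false] at hw
    simp only [fOf]
    rcases hw with rfl | rfl <;> simp only <;> omega
  · rw [Mem.readLE_writeLE_disjoint_noWrap _ _ _ _ _ _ (by u_omega) (by u_omega) (by u_omega),
      Mem.readLE_writeLE_same _ _ _ _ (by decide)]
    have hlt := (e.reg .rdi).toNat_lt
    have e1 : (e.reg .rdi).toNat % 256 ^ 8 = (e.reg .rdi).toNat := Nat.mod_eq_of_lt (by omega)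
    rw [e1]
    exact UInt64.ofNat_toNat

/-- **`mov r14d, eax`** on a callee's `int` result `z`: the copy is the same `int` (from the farm's proof of
vorbis_decode_packet_rest.3b, the same code shape). -/
theorem result_sign (z : Word) : argInt (Word.ofBV (Word.part .w32 z)) = argInt z := by
  have e1 : (Word.ofBV (Word.part .w32 z)).toNat % 2 ^ 32 = z.toNat % 2 ^ 32 := by
    rw [Vorbis.toNat_ofBV32, Vorbis.toNat_part32, Nat.mod_mod]
  unfold argInt
  rw [e1]

/-- **`valid_bits -= len` did not go negative** (`sub eax, ebx ; js`, sign flag clear): with `valid_bits ∈ [−1, 32]` (V1) and a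
length byte, the stored difference is in `[−1, 32]`: V1 again. A closed bit-vector fact (from the farm's proof of
vorbis_decode_packet_rest.3b, the same code shape). -/
theorem vb_sub_ok (M : BitVec 32) (L : BitVec 8) (h1 : (4294967295#32).sle M = true) (h2 : M.sle 32#32 = true)
    (hs : (M - BitVec.zeroExtend 32 (BitVec.setWidth 8 (BitVec.zeroExtend 32 L))).msb = false) :
    (4294967295#32).sle (M - BitVec.zeroExtend 32 (BitVec.setWidth 8 (BitVec.zeroExtend 32 L))) = true ∧
      (M - BitVec.zeroExtend 32 (BitVec.setWidth 8 (BitVec.zeroExtend 32 L))).sle 32#32 = true := by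
  bv_decide

/-- The signed form of `vb_sub_ok`, as `Bits.store_valid_bits` wants it. -/
theorem vb_sub_V1 (M : BitVec 32) (L : BitVec 8) (hM : -1 ≤ M.toInt ∧ M.toInt ≤ 32)
    (hs : (M - BitVec.zeroExtend 32 (BitVec.setWidth 8 (BitVec.zeroExtend 32 L))).msb = false) :
    -1 ≤ (M - BitVec.zeroExtend 32 (BitVec.setWidth 8 (BitVec.zeroExtend 32 L))).toInt ∧
      (M - BitVec.zeroExtend 32 (BitVec.setWidth 8 (BitVec.zeroExtend 32 L))).toInt ≤ 32 := by
  have e1 : (4294967295#32).toInt = -1 := by decide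
  have e2 : (32#32).toInt = 32 := by decide
  have h1 : (4294967295#32).sle M = true := by
    rw [BitVec.sle_eq_decide, e1]
    exact decide_eq_true hM.1
  have h2 : M.sle 32#32 = true := by
    rw [BitVec.sle_eq_decide, e2]
    exact decide_eq_true hM.2
  obtain ⟨k1, k2⟩ := vb_sub_ok M L h1 h2 hs
  rw [BitVec.sle_eq_decide, e1] at k1
  rw [BitVec.sle_eq_decide, e2] at k2
  exact ⟨of_decide_eq_true k1, of_decide_eq_true k2⟩

/-- The 32-bit load of `valid_bits`, as a signed bit vector, is the field. -/
theorem vb_toInt (mem : Mem) (f m : Nat) (h : mem.readLE (addr f + 1768) 4 = m) :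
    (BitVec.ofNat 32 m).toInt = stb_vorbis.valid_bits mem f := by
  have hlt : m < 2 ^ 32 := by
    rw [← h]
    exact Mem.readLE_lt' mem _ 4
  rw [BitVec.toInt_eq_toNat_cond, BitVec.toNat_ofNat, Nat.mod_eq_of_lt hlt]
  rcases Vorbis.Spec.PrepHuffman.vb_cases mem f m h with ⟨h1, h2⟩ | ⟨h1, h2, h3⟩
  · rw [h2]
    split <;> omega
  · rw [h3]
    split <;> omega

/-- **The stores of the fast path of DECODE_RAW** (10DE3EH … 10DEC2H, and 10DC52H when `valid_bits` went negative): the three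
stack stores of `stack_stores`, `f->acc >>= n` (10DEA2H), the return address of the last check at `[rsp−8]`, the dead copy of
`valid_bits` at `[rsp+4]` (10DEBCH), and the new `valid_bits` `Y` (a value within V1: `valid_bits − n` when it is not negative,
else 0 — the walker has already merged the two stores at 10DEC2H / 10DC52H into one). They stay inside `Seg2Wins`; `Bits f` holds
again and μ is kept (`Bits.store_other`, `Bits.store_valid_bits`, `Reader.store_off_obj`); the spill slot holds `f`. -/
theorem fast_stores {others : List Obj} {frames : List (Nat × FrameLayout)} {Blk : Block → Prop} {len : Nat} {u₀ : State}
    {ret : Word} {e u : State} (h : Common others frames Blk len u₀ ret e u) (g : DeintGeo e) (r1 r2 r3 X V Y : Nat)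
    (hY : ∃ x : BitVec 32, Y = x.toNat ∧ -1 ≤ x.toInt ∧ x.toInt ≤ 32) (m' : Mem)
    (hm : m' = ((((((u.mem.writeLE (e.reg .rsp - 112) 8 r1).writeLE (e.reg .rsp - 80) 8 (e.reg .rdi).toNat).writeLE
      (e.reg .rsp - 112) 8 r2).writeLE (e.reg .rdi + 1764) 4 X).writeLE (e.reg .rsp - 112) 8 r3).writeLE
      (e.reg .rsp - 100) 4 V).writeLE (e.reg .rdi + 1768) 4 Y) :
    Mem.SameExcept (Seg2Wins (e.reg .rsp).toNat (fOf e)) u.mem m' ∧ ReaderPost Blk len e.mem m' (fOf e) ∧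
      UInt64.ofNat (m'.readLE (e.reg .rsp - 80) 8) = e.reg .rdi := by
  have hlo := g.sp_lo
  have hhi := g.sp_hi
  have gf1 := g.f_st
  have gf2 := g.f_lo
  have gf3 := g.f_hi
  simp only [fOf] at gf1 gf2 gf3
  obtain ⟨x, rfl, hx⟩ := hY
  subst hm
  obtain ⟨hs1, hrd1, hf1⟩ := stack_stores h g r1 r2 _ rfl
  refine ⟨?_, ?_, ?_⟩
  · -- the footprint: one store after the other, each inside a window of `Seg2Wins`
    unfold Seg2Wins at hs1 ⊢
    have hs2 := hs1.step_writeLE (e.reg .rdi + 1764) 4 X (by u_omega)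
      ⟨⟨fOf e + 1752, fOf e + 1784⟩, by simp only [List.mem_cons, true_or, or_true], by simp only [fOf]; u_omega,
        by simp only [fOf]; u_omega⟩
    have hs3 := hs2.step_writeLE (e.reg .rsp - 112) 8 r3 (by u_omega) ⟨_, List.mem_cons_self, by u_omega, by u_omega⟩
    have hs4 := hs3.step_writeLE (e.reg .rsp - 100) 4 V (by u_omega) ⟨_, List.mem_cons_self, by u_omega, by u_omega⟩
    exact hs4.step_writeLE (e.reg .rdi + 1768) 4 x.toNat (by u_omega)
      ⟨⟨fOf e + 1752, fOf e + 1784⟩, by simp only [List.mem_cons, true_or, or_true], by simp only [fOf]; u_omega,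
        by simp only [fOf]; u_omega⟩
  · -- `Bits f`, μ
    have e4 : e.reg .rdi + 1764 = addr (fOf e + 1764) := by
      rw [← addr_add_lit, addr_toNat]
    have e8 : e.reg .rdi + 1768 = addr (fOf e + 1768) := by
      rw [← addr_add_lit, addr_toNat]
    rw [e4, e8]
    have k1 := Vorbis.Spec.BitReader.acc_store hrd1.bits X
    have k2 := Vorbis.Spec.Reader.store_off_obj k1.1 (e.reg .rsp - 112) 8 r3 (by u_omega) (by simp only [fOf]; u_omega)
    have k3 := Vorbis.Spec.Reader.store_off_obj k2.1.bits (e.reg .rsp - 100) 4 V (by u_omega) (by simp only [fOf]; u_omega)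
    have k4 := Vorbis.Spec.BitReader.vb_store k3.1.bits x hx
    refine hrd1.trans ⟨k4.1, ?_⟩
    rw [k4.2.1]
    exact Nat.le_trans k3.1.mu_le (Nat.le_trans k2.1.mu_le (Nat.le_of_eq k1.2.1))
  · -- the spill slot of `f` is off the four later stores
    rw [Mem.readLE_writeLE_disjoint_noWrap _ _ _ _ _ _ (by u_omega) (by u_omega) (by u_omega),
      Mem.readLE_writeLE_disjoint_noWrap _ _ _ _ _ _ (by u_omega) (by u_omega) (by u_omega),
      Mem.readLE_writeLE_disjoint_noWrap _ _ _ _ _ _ (by u_omega) (by u_omega) (by u_omega),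
      Mem.readLE_writeLE_disjoint_noWrap _ _ _ _ _ _ (by u_omega) (by u_omega) (by u_omega)]
    exact hf1

end Vorbis.Spec.codebook_decode_deinterleave_repeat_2b
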